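-- pv_equiv track=rewrite | github.com/SaloniK17/ShipmentExtractDetailsAgent | utils.py | fallback_best_name
-- ===== SOURCE A (Python) =====
-- from typing import Any, Dict, List, Optional, Tuple
--
-- def fallback_best_name(names: List[str]) -> Optional[str]:
--     """
--     Choose cleanest default display name when raw text is weak.
--
--     Preference:
--     - avoid slash-combined names
--     - prefer non-ICD if possible
--     - shorter clean names
--     """
--     if not names:
--         return None
--
--     unique = list(dict.fromkeys(n.strip() for n in names if n and n.strip()))
--     if not unique:
--         return None
--
--     no_slash = [n for n in unique if "/" not in n]
--     if no_slash:
--         unique = no_slash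
--
--     non_icd = [n for n in unique if "ICD" not in n.upper()]
--     if non_icd:
--         unique = non_icd
--
--     return min(unique, key=len)
-- ===== SOURCE B (Python) =====
-- from typing import List, Optional
--
-- def fallback_best_name(names: List[str]) -> Optional[str]:
--     """Choose cleanest default display name: single keyed min instead of staged filters."""
--     if not names:
--         return None
--     unique = list(dict.fromkeys(n.strip() for n in names if n and n.strip()))
--     if not unique:
--         return None
--     return min(unique, key=lambda n: ("/" in n, "ICD" in n.upper(), len(n)))
-- ===== Notes on version B (the rewrite author's own statement) =====
-- stated objective: simpler
-- what changed: The two conditional filter passes plus the final min-by-length are collapsed into a single min over the deduplicated list with a lexicographic key (has-slash, contains-ICD, length), which encodes the same preference order and first-occurrence tie-break.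
import Mathlib
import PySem

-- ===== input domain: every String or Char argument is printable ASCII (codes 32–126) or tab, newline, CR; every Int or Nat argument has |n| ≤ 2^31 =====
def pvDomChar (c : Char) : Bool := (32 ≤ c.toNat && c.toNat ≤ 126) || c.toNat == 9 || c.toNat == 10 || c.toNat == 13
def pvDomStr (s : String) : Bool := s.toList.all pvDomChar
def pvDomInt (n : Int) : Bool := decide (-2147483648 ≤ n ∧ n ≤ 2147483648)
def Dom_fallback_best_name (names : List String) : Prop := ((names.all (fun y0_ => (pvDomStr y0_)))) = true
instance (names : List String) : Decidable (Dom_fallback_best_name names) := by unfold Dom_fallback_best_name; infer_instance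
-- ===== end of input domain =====

-- B replaces A's two conditional filter passes + min-by-length with ONE min over a lexicographic
-- key (has-slash, contains-ICD, length); objective: simpler.

-- ===== PORT A =====
def fallback_best_name (names : List String) : Option String :=
  if names = [] then none
  else
    -- unique = list(dict.fromkeys(n.strip() for n in names if n and n.strip()))
    let unique := PySem.List.dedup (names.filterMap (fun n =>
      if n ≠ "" && PySem.Str.strip n ≠ "" then some (PySem.Str.strip n) else none))
    if unique = [] then none
    else
      let no_slash := unique.filter (fun n => !(PySem.Str.isIn "/" n))
      let unique1 := if no_slash = [] then unique else no_slash
      let non_icd := unique1.filter (fun n => !(PySem.Str.isIn "ICD" (PySem.Str.upper n)))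
      let unique2 := if non_icd = [] then unique1 else non_icd
      PySem.List.min? unique2 (fun n => PySem.Str.len n)

-- ===== PORT B =====
-- B's composite key ('/' in n, 'ICD' in n.upper(), len(n)) is compared lexicographically; Python's
-- 3-tuple min is ported with PySem.List.min2? (the tuple-key min), grouping the key as
-- (('/' in n, 'ICD' in n.upper()), len(n)) — the identical lexicographic order.
def pvKeyB1 (n : String) : Bool ×ₗ Bool :=
  toLex (PySem.Str.isIn "/" n, PySem.Str.isIn "ICD" (PySem.Str.upper n))

def fallback_best_name_alt (names : List String) : Option String :=
  if names = [] then none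
  else
    let unique := PySem.List.dedup (names.filterMap (fun n =>
      if n ≠ "" && PySem.Str.strip n ≠ "" then some (PySem.Str.strip n) else none))
    if unique = [] then none
    else PySem.List.min2? unique pvKeyB1 (fun n => PySem.Str.len n)

-- ===== PRECONDITION & SPEC =====
def Spec_fallback_best_name (names : List String) (out : Option String) : Prop := out = fallback_best_name_alt names
instance (names : List String) (out : Option String) : Decidable (Spec_fallback_best_name names out) := by unfold Spec_fallback_best_name; infer_instance

-- ===== CLAIM (what is proved, stated in full; the proofs are below) =====
def Claim_equal_fallback_best_name : Prop := ∀ (names : List String), Dom_fallback_best_name names → Spec_fallback_best_name names (fallback_best_name names)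

-- ===== LEMMAS AND PROOFS =====

-- lexicographic '<' on Bool × κ, spelled out
lemma pvLex_lt_iff {κ : Type} [LinearOrder κ] (b1 b2 : Bool) (k1 k2 : κ) :
    ((toLex (b1, k1) : Bool ×ₗ κ) < toLex (b2, k2)) ↔ ((b1 = false ∧ b2 = true) ∨ (b1 = b2 ∧ k1 < k2)) := by
  rw [Prod.Lex.toLex_lt_toLex]
  cases b1 <;> cases b2 <;> simp [Bool.lt_iff]

-- min2? with a (Bool-pair, k) key is min? with the corresponding nested lexicographic key
lemma pvMin2_eq {α κ : Type} [LinearOrder κ] (b1 b2 : α → Bool) (k : α → κ) (u : List α) :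
    PySem.List.min2? u (fun x => (toLex (b1 x, b2 x) : Bool ×ₗ Bool)) k
      = PySem.List.min? u (fun x => (toLex (b1 x, (toLex (b2 x, k x) : Bool ×ₗ κ)) : Bool ×ₗ (Bool ×ₗ κ))) := by
  show List.foldl _ none u = List.foldl _ none u
  congr 1
  funext acc x
  cases acc with
  | none => rfl
  | some m =>
    show (if _ then some x else some m) = (if _ then some x else some m)
    congr 1
    simp only [pvLex_lt_iff, Bool.or_eq_true, Bool.and_eq_true, Bool.not_eq_true', decide_eq_true_eq, decide_eq_false_iff_not]
    by_cases h1 : k x < k m <;> by_cases h2 : k m < k x <;>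
      cases hb1x : b1 x <;> cases hb1m : b1 m <;> cases hb2x : b2 x <;> cases hb2m : b2 m <;>
        simp [h1, h2]

-- the foldl step of PySem.List.min?
def pvMinStep {α κ : Type} [LT κ] [DecidableLT κ] (key : α → κ) (acc : Option α) (x : α) : Option α :=
  match acc with
  | none => some x
  | some m => if key x < key m then some x else some m

lemma pvMin?_eq_foldl {α κ : Type} [LT κ] [DecidableLT κ] (xs : List α) (key : α → κ) :
    PySem.List.min? xs key = xs.foldl (pvMinStep key) none := rfl

-- invariant relating the composite-key fold (over all of u) with the plain-key fold (over the filtered u)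
def pvRel {α : Type} (b : α → Bool) (accL accR : Option α) : Prop :=
  (accR = none ∧ (accL = none ∨ ∃ m, accL = some m ∧ b m = true)) ∨
  (∃ m, accL = some m ∧ accR = some m ∧ b m = false)

lemma pvFoldStage {α κ : Type} [LinearOrder κ] (b : α → Bool) (k : α → κ) :
    ∀ (u : List α) (accL accR : Option α), pvRel b accL accR →
      pvRel b (u.foldl (pvMinStep (fun x => (toLex (b x, k x) : Bool ×ₗ κ))) accL)
              ((u.filter (fun x => !(b x))).foldl (pvMinStep k) accR) := by
  intro u
  induction u with
  | nil => intro accL accR h; simpa using h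
  | cons x t ih =>
    intro accL accR h
    by_cases hbx : b x = true
    · -- x is "bad": filtered out on the right
      simp only [List.foldl_cons, List.filter_cons, hbx]
      simp only [Bool.not_true, Bool.false_eq_true, if_false]
      apply ih
      rcases h with ⟨hR, hL⟩ | ⟨m, hL, hR, hbm⟩
      · rcases hL with hL | ⟨m, hL, hbm⟩
        · exact Or.inl ⟨hR, Or.inr ⟨x, by simp [pvMinStep, hL], hbx⟩⟩
        · subst hL
          simp only [pvMinStep]
          split
          · exact Or.inl ⟨hR, Or.inr ⟨x, rfl, hbx⟩⟩
          · exact Or.inl ⟨hR, Or.inr ⟨m, rfl, hbm⟩⟩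
      · subst hL
        have hnot : ¬ ((toLex (b x, k x) : Bool ×ₗ κ) < toLex (b m, k m)) := by
          rw [pvLex_lt_iff]; simp [hbx, hbm]
        refine Or.inr ⟨m, ?_, hR, hbm⟩
        simp [pvMinStep, hnot]
    · -- x is "good": kept on the right
      have hbx' : b x = false := by simpa using hbx
      simp only [List.foldl_cons, List.filter_cons, hbx']
      simp only [Bool.not_false, if_true, List.foldl_cons]
      apply ih
      rcases h with ⟨hR, hL⟩ | ⟨m, hL, hR, hbm⟩
      · rcases hL with hL | ⟨m, hL, hbm⟩
        · subst hL; subst hR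
          exact Or.inr ⟨x, by simp [pvMinStep], by simp [pvMinStep], hbx'⟩
        · subst hL; subst hR
          have hlt : (toLex (b x, k x) : Bool ×ₗ κ) < toLex (b m, k m) := by
            rw [pvLex_lt_iff]; simp [hbx', hbm]
          exact Or.inr ⟨x, by simp [pvMinStep, hlt], by simp [pvMinStep], hbx'⟩
      · subst hL; subst hR
        have hiff : ((toLex (b x, k x) : Bool ×ₗ κ) < toLex (b m, k m)) ↔ k x < k m := by
          rw [pvLex_lt_iff]; simp [hbx', hbm]
        by_cases hk : k x < k m
        · exact Or.inr ⟨x, by simp [pvMinStep, hiff.mpr hk], by simp [pvMinStep, hk], hbx'⟩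
        · exact Or.inr ⟨m, by simp [pvMinStep, hk, hiff], by simp [pvMinStep, hk], hbm⟩

-- when every element is "bad" the composite comparison degenerates to the plain one
lemma pvFoldConst {α κ : Type} [LinearOrder κ] (b : α → Bool) (k : α → κ) :
    ∀ (u : List α) (acc : Option α), (∀ x ∈ u, b x = true) →
      (acc = none ∨ ∃ m, acc = some m ∧ b m = true) →
      u.foldl (pvMinStep (fun x => (toLex (b x, k x) : Bool ×ₗ κ))) acc = u.foldl (pvMinStep k) acc := by
  intro u
  induction u with
  | nil => intro acc _ _; rfl
  | cons x t ih =>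
    intro acc hall hacc
    have hbx : b x = true := hall x (by simp)
    have hall' : ∀ y ∈ t, b y = true := fun y hy => hall y (by simp [hy])
    simp only [List.foldl_cons]
    rcases hacc with hacc | ⟨m, hacc, hbm⟩
    · subst hacc
      exact ih (some x) hall' (Or.inr ⟨x, rfl, hbx⟩)
    · subst hacc
      have hiff : ((toLex (b x, k x) : Bool ×ₗ κ) < toLex (b m, k m)) ↔ k x < k m := by
        rw [pvLex_lt_iff]; simp [hbx, hbm]
      by_cases hk : k x < k m
      · simp only [pvMinStep, hiff, hk, if_true]
        exact ih (some x) hall' (Or.inr ⟨x, rfl, hbx⟩)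
      · simp only [pvMinStep, hiff, hk, if_false]
        exact ih (some m) hall' (Or.inr ⟨m, rfl, hbm⟩)

-- one staged filter pass of A equals one lexicographic component of B's key
lemma pvMinStage {α κ : Type} [LinearOrder κ] (b : α → Bool) (k : α → κ) (u : List α) :
    PySem.List.min? u (fun x => (toLex (b x, k x) : Bool ×ₗ κ)) =
      PySem.List.min? (if u.filter (fun x => !(b x)) = [] then u else u.filter (fun x => !(b x))) k := by
  by_cases hf : u.filter (fun x => !(b x)) = []
  · rw [if_pos hf, pvMin?_eq_foldl, pvMin?_eq_foldl]
    have hall : ∀ x ∈ u, b x = true := by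
      intro x hx
      by_contra hbx
      have : x ∈ u.filter (fun x => !(b x)) := by
        simp [List.mem_filter, hx, Bool.eq_false_iff.mpr hbx]
      rw [hf] at this; exact absurd this (by simp)
    exact pvFoldConst b k u none hall (Or.inl rfl)
  · rw [if_neg hf, pvMin?_eq_foldl, pvMin?_eq_foldl]
    have h := pvFoldStage b k u none none (Or.inl ⟨rfl, Or.inl rfl⟩)
    rcases h with ⟨hR, _⟩ | ⟨m, hL, hR, _⟩
    · exfalso
      have : PySem.List.min? (u.filter (fun x => !(b x))) k = none := by
        rw [pvMin?_eq_foldl]; exact hR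
      rw [PySem.List.min?_eq_none_iff] at this
      exact hf this
    · rw [hL, hR]

-- ===== VERDICT (by name: the statement is the Claim_ definition above) =====
theorem fallback_best_name_spec : Claim_equal_fallback_best_name := by
  intro names _
  unfold Spec_fallback_best_name fallback_best_name fallback_best_name_alt
  by_cases h0 : names = []
  · simp [h0]
  · rw [if_neg h0, if_neg h0]
    set unique := PySem.List.dedup (names.filterMap (fun n =>
      if n ≠ "" && PySem.Str.strip n ≠ "" then some (PySem.Str.strip n) else none)) with hu
    by_cases h1 : unique = []
    · simp [h1]
    · rw [if_neg h1, if_neg h1]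
      have hB : PySem.List.min2? unique pvKeyB1 (fun n => PySem.Str.len n) =
          PySem.List.min? unique (fun n => (toLex (PySem.Str.isIn "/" n,
            (toLex (PySem.Str.isIn "ICD" (PySem.Str.upper n), PySem.Str.len n) : Bool ×ₗ Int)) : Bool ×ₗ (Bool ×ₗ Int))) :=
        pvMin2_eq (fun n => PySem.Str.isIn "/" n) (fun n => PySem.Str.isIn "ICD" (PySem.Str.upper n)) (fun n => PySem.Str.len n) unique
    -- peel the slash component, then the ICD component
      rw [hB,
        pvMinStage (fun n => PySem.Str.isIn "/" n)
          (fun n => (toLex (PySem.Str.isIn "ICD" (PySem.Str.upper n), PySem.Str.len n) : Bool ×ₗ Int)) unique,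
        pvMinStage (fun n => PySem.Str.isIn "ICD" (PySem.Str.upper n)) (fun n => PySem.Str.len n)]
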